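-- pv_equiv track=rewrite | github.com/skandaka/snack-forge | backend/routes/ingredients.py | _find_flavor_conflicts
-- ===== SOURCE A (Python) =====
-- def _find_flavor_conflicts(existing_flavors: set, new_flavors: set) -> set:
--     """Find potential flavor conflicts"""
--     conflicts = set()
--
--     # Define conflicting flavor pairs
--     conflict_pairs = {
--         ("sweet", "bitter"),
--         ("mild", "intense"),
--         ("floral", "earthy")
--     }
--
--     for existing_flavor in existing_flavors:
--         for new_flavor in new_flavors:
--             for pair in conflict_pairs:
--                 if (existing_flavor in pair and new_flavor in pair and
--                         existing_flavor != new_flavor):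
--                     conflicts.add((existing_flavor, new_flavor))
--
--     return conflicts
-- ===== SOURCE B (Python) =====
-- def _find_flavor_conflicts(existing_flavors: set, new_flavors: set) -> set:
--     """Find potential flavor conflicts (partner-lookup: one pass over existing_flavors)"""
--     partner = {
--         "sweet": "bitter", "bitter": "sweet",
--         "mild": "intense", "intense": "mild",
--         "floral": "earthy", "earthy": "floral",
--     }
--     conflicts = set()
--     for flavor in existing_flavors:
--         other = partner.get(flavor)
--         if other is not None and other in new_flavors:
--             conflicts.add((flavor, other))
--     return conflicts
-- ===== Notes on version B (the rewrite author's own statement) =====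
-- stated objective: faster
-- what changed: Replaces the triple nested loop over existing x new x conflict_pairs with a precomputed flavor-to-conflicting-partner map and a single pass over existing_flavors with an O(1) set-membership test, eliminating both inner loops.
import Mathlib
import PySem

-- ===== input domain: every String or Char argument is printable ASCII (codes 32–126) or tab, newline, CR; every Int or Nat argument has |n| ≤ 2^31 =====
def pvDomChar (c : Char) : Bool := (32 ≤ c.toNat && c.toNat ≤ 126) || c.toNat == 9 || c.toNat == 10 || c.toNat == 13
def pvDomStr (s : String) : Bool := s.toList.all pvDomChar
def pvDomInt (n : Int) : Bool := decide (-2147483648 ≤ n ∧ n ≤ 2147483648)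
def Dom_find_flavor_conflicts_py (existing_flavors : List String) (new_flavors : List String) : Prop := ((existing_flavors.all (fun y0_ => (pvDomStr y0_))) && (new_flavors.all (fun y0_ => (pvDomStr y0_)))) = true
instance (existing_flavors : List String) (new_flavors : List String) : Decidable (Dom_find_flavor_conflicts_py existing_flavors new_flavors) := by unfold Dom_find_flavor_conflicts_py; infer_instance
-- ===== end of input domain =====

-- B replaces A's triple nested loop with a flavor→partner lookup table and one pass over
-- existing_flavors (objective: faster). Input sets are Lists of the distinct elements; the result
-- set is a PySem.Set. (Python's hash iteration order over the input sets is not modelled; both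
-- ports iterate the given list in list order, and the output is compared as a set.)

-- ===== PORT A =====
-- A's conflict_pairs set literal; iteration order over it does not affect the result
-- (the loop body only adds the same element (existing_flavor, new_flavor)), so list order is used.
def pvConflictPairs : List (String × String) :=
  PySem.Set.ofList [("sweet", "bitter"), ("mild", "intense"), ("floral", "earthy")]

def find_flavor_conflicts_py (existing_flavors : List String) (new_flavors : List String) : List (String × String) :=
  existing_flavors.foldl (fun conflicts existing_flavor =>
    new_flavors.foldl (fun conflicts new_flavor =>
      pvConflictPairs.foldl (fun conflicts pair =>
        if (existing_flavor = pair.1 ∨ existing_flavor = pair.2) ∧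
           (new_flavor = pair.1 ∨ new_flavor = pair.2) ∧
           existing_flavor ≠ new_flavor
        then PySem.Set.add conflicts (existing_flavor, new_flavor)
        else conflicts) conflicts) conflicts) PySem.Set.empty

-- ===== PORT B =====
def pvPartner : PySem.Dict String String :=
  PySem.Dict.ofList [("sweet", "bitter"), ("bitter", "sweet"),
                     ("mild", "intense"), ("intense", "mild"),
                     ("floral", "earthy"), ("earthy", "floral")]

def find_flavor_conflicts_py_alt (existing_flavors : List String) (new_flavors : List String) : List (String × String) :=
  existing_flavors.foldl (fun conflicts flavor =>
    match pvPartner.get? flavor with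
    | some other => if new_flavors.contains other
                    then PySem.Set.add conflicts (flavor, other)
                    else conflicts
    | none => conflicts) PySem.Set.empty

-- ===== PRECONDITION & SPEC =====
def Spec_find_flavor_conflicts_py (existing_flavors : List String) (new_flavors : List String) (out : List (String × String)) : Prop := out = find_flavor_conflicts_py_alt existing_flavors new_flavors
instance (existing_flavors : List String) (new_flavors : List String) (out : List (String × String)) : Decidable (Spec_find_flavor_conflicts_py existing_flavors new_flavors out) := by unfold Spec_find_flavor_conflicts_py; infer_instance

-- ===== CLAIM (what is proved, stated in full; the proofs are below) =====
def Claim_equal_find_flavor_conflicts_py : Prop := ∀ (existing_flavors : List String) (new_flavors : List String), Dom_find_flavor_conflicts_py existing_flavors new_flavors → Spec_find_flavor_conflicts_py existing_flavors new_flavors (find_flavor_conflicts_py existing_flavors new_flavors)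


-- ===== LEMMAS AND PROOFS =====

-- For fixed flavors e, n, A's innermost loop over the three conflict pairs adds (e, n)
-- exactly when n is e's conflicting partner in pvPartner.
theorem pairs_loop_char (c : List (String × String)) (e n : String) :
    pvConflictPairs.foldl (fun conflicts pair =>
      if (e = pair.1 ∨ e = pair.2) ∧ (n = pair.1 ∨ n = pair.2) ∧ e ≠ n
      then PySem.Set.add conflicts (e, n) else conflicts) c
    = if pvPartner.get? e = some n then PySem.Set.add c (e, n) else c := by
  rw [show pvConflictPairs = [("sweet","bitter"),("mild","intense"),("floral","earthy")] from by decide]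
  simp only [List.foldl]
  by_cases h1 : (e = "sweet" ∨ e = "bitter") ∧ (n = "sweet" ∨ n = "bitter") ∧ e ≠ n
  · obtain ⟨he | he, hn | hn, hne⟩ := h1 <;> subst he <;> subst hn <;>
      first
      | exact absurd rfl hne
      | (rw [show pvPartner.get? "sweet" = some "bitter" from by decide]; simp)
      | (rw [show pvPartner.get? "bitter" = some "sweet" from by decide]; simp)
  · rw [if_neg h1]
    by_cases h2 : (e = "mild" ∨ e = "intense") ∧ (n = "mild" ∨ n = "intense") ∧ e ≠ n
    · obtain ⟨he | he, hn | hn, hne⟩ := h2 <;> subst he <;> subst hn <;>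
        first
        | exact absurd rfl hne
        | (rw [show pvPartner.get? "mild" = some "intense" from by decide]; simp)
        | (rw [show pvPartner.get? "intense" = some "mild" from by decide]; simp)
    · rw [if_neg h2]
      by_cases h3 : (e = "floral" ∨ e = "earthy") ∧ (n = "floral" ∨ n = "earthy") ∧ e ≠ n
      · obtain ⟨he | he, hn | hn, hne⟩ := h3 <;> subst he <;> subst hn <;>
          first
          | exact absurd rfl hne
          | (rw [show pvPartner.get? "floral" = some "earthy" from by decide]; simp)
          | (rw [show pvPartner.get? "earthy" = some "floral" from by decide]; simp)
      · rw [if_neg h3]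
        by_cases hg : pvPartner.get? e = some n
        · exfalso
          have hm := PySem.Dict.mem_items_of_get?_eq_some pvPartner hg
          rw [show pvPartner.items = [("sweet","bitter"),("bitter","sweet"),("mild","intense"),
              ("intense","mild"),("floral","earthy"),("earthy","floral")] from by decide] at hm
          simp only [List.mem_cons, List.not_mem_nil, or_false, Prod.mk.injEq] at hm
          rcases hm with ⟨he, hn⟩ | ⟨he, hn⟩ | ⟨he, hn⟩ | ⟨he, hn⟩ | ⟨he, hn⟩ | ⟨he, hn⟩ <;>
            subst he <;> subst hn <;> simp_all
        · rw [if_neg hg]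

-- A's middle loop over new_flavors equals B's single partner lookup plus membership test.
theorem middle_loop_char (new_flavors : List String) (c : List (String × String)) (e : String) :
    new_flavors.foldl (fun conflicts n =>
      pvConflictPairs.foldl (fun conflicts pair =>
        if (e = pair.1 ∨ e = pair.2) ∧ (n = pair.1 ∨ n = pair.2) ∧ e ≠ n
        then PySem.Set.add conflicts (e, n) else conflicts) conflicts) c
    = match pvPartner.get? e with
      | some other => if new_flavors.contains other then PySem.Set.add c (e, other) else c
      | none => c := by
  induction new_flavors generalizing c with
  | nil => cases pvPartner.get? e <;> simp
  | cons n rest ih =>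
    simp only [List.foldl]
    rw [pairs_loop_char]
    cases hg : pvPartner.get? e with
    | none => rw [if_neg (by simp), ih, hg]
    | some t =>
      by_cases htn : t = n
      · subst htn
        rw [if_pos rfl, ih, hg]
        simp only [List.contains_cons, BEq.rfl, Bool.true_or, if_pos]
        split_ifs with h2
        · exact PySem.Set.add_of_mem (by simp [PySem.Set.mem_add])
        · rfl
      · rw [if_neg (by simp [htn]), ih, hg]
        simp only [List.contains_cons]
        rw [show (t == n) = false from by simp [htn]]
        simp

-- The two full folds agree for every accumulator.
theorem folds_eq (existing_flavors new_flavors : List String) (c : List (String × String)) :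
    existing_flavors.foldl (fun conflicts e =>
      new_flavors.foldl (fun conflicts n =>
        pvConflictPairs.foldl (fun conflicts pair =>
          if (e = pair.1 ∨ e = pair.2) ∧ (n = pair.1 ∨ n = pair.2) ∧ e ≠ n
          then PySem.Set.add conflicts (e, n) else conflicts) conflicts) conflicts) c
    = existing_flavors.foldl (fun conflicts flavor =>
        match pvPartner.get? flavor with
        | some other => if new_flavors.contains other
                        then PySem.Set.add conflicts (flavor, other) else conflicts
        | none => conflicts) c := by
  induction existing_flavors generalizing c with
  | nil => rfl
  | cons e rest ih =>
    simp only [List.foldl]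
    rw [middle_loop_char]
    exact ih _

-- ===== VERDICT (by name: the statement is the Claim_ definition above) =====
theorem find_flavor_conflicts_py_spec : Claim_equal_find_flavor_conflicts_py := by
  intro existing_flavors new_flavors _
  unfold Spec_find_flavor_conflicts_py find_flavor_conflicts_py find_flavor_conflicts_py_alt
  exact folds_eq existing_flavors new_flavors PySem.Set.empty
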